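-- pv_equiv track=rewrite | github.com/backend-kms/Algorithm | 프로그래머스/0/120956. 옹알이 （1）/옹알이 （1）.py | solution
-- ===== SOURCE A (Python) =====
-- def solution(babbling):
--     answer = 0
--     possible = ["aya", "ye", "woo", "ma"]
--     for i in babbling:
--         word = i
--         for p in possible:
--             word = word.replace(p, " ")
--         if word.strip() == "":
--             answer += 1
--
--     return answer
-- ===== SOURCE B (Python) =====
-- def solution(babbling):
--     # Greedy left-to-right tokenizer: the four tokens start with four distinct
--     # letters (none of them whitespace), so at each position at most one rule
--     # applies and a single linear scan decides whether the string is a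
--     # concatenation of babble tokens and whitespace characters (the exact set
--     # A's replace-with-space + strip() test accepts).
--     tokens = ("aya", "ye", "woo", "ma")
--     answer = 0
--     for s in babbling:
--         i = 0
--         n = len(s)
--         while i < n:
--             for t in tokens:
--                 if s.startswith(t, i):
--                     i += len(t)
--                     break
--             else:
--                 if s[i].isspace():
--                     i += 1
--                 else:
--                     break
--         if i == n:
--             answer += 1
--     return answer
-- ===== Notes on version B (the rewrite author's own statement) =====
-- stated objective: alternative
-- what changed: A rewrites each string four times, blanking every token occurrence with a space, and then tests strip()==''; B replaces the whole rewriting pipeline with a single greedy left-to-right tokenizer scan (the tokens have pairwise distinct non-whitespace first letters, so one linear pass decides membership).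
import Mathlib
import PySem

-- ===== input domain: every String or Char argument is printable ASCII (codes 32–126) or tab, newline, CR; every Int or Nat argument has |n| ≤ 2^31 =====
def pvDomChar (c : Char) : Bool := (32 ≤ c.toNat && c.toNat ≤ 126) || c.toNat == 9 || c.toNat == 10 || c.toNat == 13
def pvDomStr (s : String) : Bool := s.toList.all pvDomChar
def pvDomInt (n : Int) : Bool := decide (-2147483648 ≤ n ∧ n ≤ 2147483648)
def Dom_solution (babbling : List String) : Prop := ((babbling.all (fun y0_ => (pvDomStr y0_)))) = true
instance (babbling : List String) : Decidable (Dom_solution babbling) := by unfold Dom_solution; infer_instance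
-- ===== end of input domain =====

-- B replaces A's four token-blanking-by-space rewriting passes with one greedy linear tokenizer scan
-- (tokens and single whitespace characters), a structurally different algorithm with the same result.


-- ===== PORT A =====
def solution (babbling : List String) : Int :=
  let possible : List String := ["aya", "ye", "woo", "ma"]
  babbling.foldl (fun answer i =>
    let word := possible.foldl (fun word p => PySem.Str.replace word p " ") i
    if PySem.Str.strip word == "" then answer + 1 else answer) 0

-- ===== PORT B =====
-- B's while-loop: greedy left-to-right consumption of one token (or one whitespace char)
-- per step; the tokens start with pairwise distinct non-whitespace letters, so at most one
-- rule applies at each position.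
def solAltScan : List Char → Bool
  | [] => true
  | 'a'::'y'::'a'::r => solAltScan r
  | 'y'::'e'::r => solAltScan r
  | 'w'::'o'::'o'::r => solAltScan r
  | 'm'::'a'::r => solAltScan r
  | c::r => if PySem.Chars.isspace c then solAltScan r else false

def solution_alt (babbling : List String) : Int :=
  babbling.foldl (fun answer s => if solAltScan s.toList then answer + 1 else answer) 0

-- ===== PRECONDITION & SPEC =====
def Spec_solution (babbling : List String) (out : Int) : Prop :=
  out = solution_alt babbling
instance (babbling : List String) (out : Int) : Decidable (Spec_solution babbling out) := by
  unfold Spec_solution; infer_instance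

-- ===== CLAIM (what is proved, stated in full; the proofs are below) =====
def Claim_equal_solution : Prop := ∀ (babbling : List String), Dom_solution babbling → Spec_solution babbling (solution babbling)

-- ===== LEMMAS AND PROOFS =====

-- one-step evaluation helpers for solAltScan on non-matching shapes
theorem pvB0 {c : Char} {t : List Char} (h1 : c ≠ 'a') (h2 : c ≠ 'y') (h3 : c ≠ 'w') (h4 : c ≠ 'm') :
    solAltScan (c::t) = (PySem.Chars.isspace c && solAltScan t) := by
  cases h : PySem.Chars.isspace c <;> simp [solAltScan, h1, h2, h3, h4, h]
theorem pvBA {e : Char} {v : List Char} (h : e ≠ 'a') : solAltScan ('a'::'y'::e::v) = false := by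
  simp [solAltScan, h, PySem.Chars.isspace]
theorem pvBA2 {d : Char} {u : List Char} (h : d ≠ 'y') : solAltScan ('a'::d::u) = false := by
  simp [solAltScan, h, PySem.Chars.isspace]
theorem pvBY {d : Char} {u : List Char} (h : d ≠ 'e') : solAltScan ('y'::d::u) = false := by
  simp [solAltScan, h, PySem.Chars.isspace]
theorem pvBW {e : Char} {v : List Char} (h : e ≠ 'o') : solAltScan ('w'::'o'::e::v) = false := by
  simp [solAltScan, h, PySem.Chars.isspace]
theorem pvBW2 {d : Char} {u : List Char} (h : d ≠ 'o') : solAltScan ('w'::d::u) = false := by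
  simp [solAltScan, h, PySem.Chars.isspace]
theorem pvBM {d : Char} {u : List Char} (h : d ≠ 'a') : solAltScan ('m'::d::u) = false := by
  simp [solAltScan, h, PySem.Chars.isspace]

-- ---- basic facts about PySem.Chars.replace (fuel/accumulator elimination) ----

theorem pvGoAcc (old new : List Char) :
    ∀ (fuel : Nat) (l acc : List Char),
      PySem.Chars.replace.go old new fuel l acc = acc.reverse ++ PySem.Chars.replace.go old new fuel l [] := by
  intro fuel
  induction fuel with
  | zero => intro l acc; simp [PySem.Chars.replace.go]
  | succ n ih =>
    intro l acc
    cases l with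
    | nil => simp [PySem.Chars.replace.go]
    | cons c t =>
      simp only [PySem.Chars.replace.go]
      by_cases hp : old.isPrefixOf (c :: t) = true
      · simp only [hp, if_true]
        rw [ih _ (new.reverse ++ acc), ih _ (new.reverse ++ [])]
        simp
      · simp only [eq_false_of_ne_true hp]
        rw [ih t (c :: acc), ih t [c]]
        simp

theorem pvGoFuel (old new : List Char) (hold : old ≠ []) :
    ∀ (f f' : Nat) (l acc : List Char), l.length ≤ f → l.length ≤ f' →
      PySem.Chars.replace.go old new f l acc = PySem.Chars.replace.go old new f' l acc := by
  intro f
  induction f with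
  | zero =>
    intro f' l acc h h'
    have : l = [] := List.length_eq_zero_iff.mp (Nat.le_zero.mp h)
    subst this
    cases f' <;> simp [PySem.Chars.replace.go]
  | succ n ih =>
    intro f' l acc h h'
    cases l with
    | nil => cases f' <;> simp [PySem.Chars.replace.go]
    | cons c t =>
      cases f' with
      | zero => simp at h'
      | succ m =>
        simp only [PySem.Chars.replace.go]
        by_cases hp : old.isPrefixOf (c :: t) = true
        · simp only [hp, if_true]
          have h2 : 1 ≤ old.length := by
            cases old with
            | nil => exact absurd rfl hold
            | cons _ _ => simp
          simp only [List.length_cons] at h h'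
          apply ih <;> simp only [List.length_drop, List.length_cons] <;> omega
        · simp only [eq_false_of_ne_true hp]
          apply ih <;> simp_all

theorem pvReplaceNil (old new : List Char) (hold : old ≠ []) :
    PySem.Chars.replace [] old new = [] := by
  simp [PySem.Chars.replace, List.isEmpty_iff, hold, PySem.Chars.replace.go]

theorem pvReplaceConsNeg (old new : List Char) (c : Char) (t : List Char)
    (h : old.isPrefixOf (c :: t) = false) :
    PySem.Chars.replace (c :: t) old new = c :: PySem.Chars.replace t old new := by
  have hold : old ≠ [] := by
    intro he; subst he; simp [List.isPrefixOf] at h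
  simp only [PySem.Chars.replace, List.isEmpty_iff, hold, if_false, List.length_cons,
    PySem.Chars.replace.go, h, Bool.false_eq_true]
  rw [pvGoAcc old new t.length t [c]]
  simp

theorem pvReplacePref (old new u : List Char) (hold : old ≠ []) :
    PySem.Chars.replace (old ++ u) old new = new ++ PySem.Chars.replace u old new := by
  cases old with
  | nil => exact absurd rfl hold
  | cons o os =>
    simp only [PySem.Chars.replace, List.isEmpty_iff, List.cons_append, List.length_cons]
    have hp : (o :: os).isPrefixOf (o :: os ++ u) = true := by
      rw [List.isPrefixOf_iff_prefix]; exact ⟨u, by simp⟩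
    have hdrop : List.drop (o :: os).length (o :: (os ++ u)) = u := by
      simpa using (List.drop_left (o :: os) u)
    simp only [List.length_append, PySem.Chars.replace.go, hp, if_true, hdrop]
    rw [pvGoAcc (o :: os) new (os.length + u.length) u (new.reverse ++ [])]
    rw [pvGoFuel (o :: os) new (by simp) (os.length + u.length) u.length u [] (by omega) (le_refl _)]
    simp

-- ---- prefix helpers ----

theorem pvPfxHead (x : Char) (xs Z : List Char) (h : Z.head? ≠ some x) :
    (x :: xs).isPrefixOf Z = false := by
  cases Z with
  | nil => simp [List.isPrefixOf]
  | cons d u =>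
    simp only [List.head?_cons, ne_eq, Option.some.injEq] at h
    simp only [List.isPrefixOf, Bool.and_eq_false_iff]
    left
    exact beq_eq_false_iff_ne.mpr (fun he => h he.symm)

theorem pvPeel (x : Char) (xs t : List Char) :
    (x :: xs).isPrefixOf (x :: t) = xs.isPrefixOf t := by
  simp [List.isPrefixOf]

-- token-blanking single steps (new = [' '] throughout, tokens as literal lists)
theorem pvPassA {c : Char} {t : List Char} (h : c ≠ 'a') :
    PySem.Chars.replace (c :: t) ['a','y','a'] [' '] = c :: PySem.Chars.replace t ['a','y','a'] [' '] :=
  pvReplaceConsNeg _ _ _ _ (pvPfxHead _ _ _ (by simpa using fun he => h he))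

theorem pvPassY {c : Char} {t : List Char} (h : c ≠ 'y') :
    PySem.Chars.replace (c :: t) ['y','e'] [' '] = c :: PySem.Chars.replace t ['y','e'] [' '] :=
  pvReplaceConsNeg _ _ _ _ (pvPfxHead _ _ _ (by simpa using fun he => h he))

theorem pvPassW {c : Char} {t : List Char} (h : c ≠ 'w') :
    PySem.Chars.replace (c :: t) ['w','o','o'] [' '] = c :: PySem.Chars.replace t ['w','o','o'] [' '] :=
  pvReplaceConsNeg _ _ _ _ (pvPfxHead _ _ _ (by simpa using fun he => h he))

theorem pvPassM {c : Char} {t : List Char} (h : c ≠ 'm') :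
    PySem.Chars.replace (c :: t) ['m','a'] [' '] = c :: PySem.Chars.replace t ['m','a'] [' '] :=
  pvReplaceConsNeg _ _ _ _ (pvPfxHead _ _ _ (by simpa using fun he => h he))

theorem pvStepA (u : List Char) :
    PySem.Chars.replace ('a'::'y'::'a'::u) ['a','y','a'] [' '] = ' ' :: PySem.Chars.replace u ['a','y','a'] [' '] := by
  simpa using pvReplacePref ['a','y','a'] [' '] u (by simp)

theorem pvStepY (u : List Char) :
    PySem.Chars.replace ('y'::'e'::u) ['y','e'] [' '] = ' ' :: PySem.Chars.replace u ['y','e'] [' '] := by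
  simpa using pvReplacePref ['y','e'] [' '] u (by simp)

theorem pvStepW (u : List Char) :
    PySem.Chars.replace ('w'::'o'::'o'::u) ['w','o','o'] [' '] = ' ' :: PySem.Chars.replace u ['w','o','o'] [' '] := by
  simpa using pvReplacePref ['w','o','o'] [' '] u (by simp)

theorem pvStepM (u : List Char) :
    PySem.Chars.replace ('m'::'a'::u) ['m','a'] [' '] = ' ' :: PySem.Chars.replace u ['m','a'] [' '] := by
  simpa using pvReplacePref ['m','a'] [' '] u (by simp)

-- head of a replaced string: either the blank ' ' or the original head
theorem pvHeadRep (old : List Char) (hold : old ≠ []) (t : List Char) (c : Char) (hc : c ≠ ' ')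
    (h : (PySem.Chars.replace t old [' ']).head? = some c) : t.head? = some c := by
  cases t with
  | nil => rw [pvReplaceNil _ _ hold] at h; simp at h
  | cons d u =>
    by_cases hp : old.isPrefixOf (d :: u) = true
    · obtain ⟨v, hv⟩ := List.isPrefixOf_iff_prefix.mp hp
      rw [← hv, pvReplacePref _ _ _ hold] at h
      cases old with
      | nil => exact absurd rfl hold
      | cons o os => simp at h; exact absurd h.symm hc
    · rw [pvReplaceConsNeg _ _ _ _ (eq_false_of_ne_true hp)] at h
      simpa using h

-- A's whole per-string pipeline: replace aya, then ye, then woo, then ma (each by a space)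
def pvPipe (s : List Char) : List Char :=
  PySem.Chars.replace (PySem.Chars.replace (PySem.Chars.replace (PySem.Chars.replace s
    ['a','y','a'] [' ']) ['y','e'] [' ']) ['w','o','o'] [' ']) ['m','a'] [' ']

theorem pvAllConsFalse (x : Char) (rest : List Char) (hx : PySem.Chars.isspace x = false) :
    ((x :: rest).all PySem.Chars.isspace) = false := by simp [hx]

-- the central characterisation: A's pipeline blanks the whole string iff it is a
-- concatenation of the four tokens and whitespace characters
theorem pvMainAux : ∀ (n : Nat) (cs : List Char), cs.length ≤ n →
    (pvPipe cs).all PySem.Chars.isspace = solAltScan cs := by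
  intro n
  induction n with
  | zero =>
    intro cs h
    have : cs = [] := List.length_eq_zero_iff.mp (Nat.le_zero.mp h)
    subst this; decide
  | succ n ih =>
    intro cs hlen
    cases cs with
    | nil => decide
    | cons c t =>
    simp only [List.length_cons] at hlen
    by_cases hca : c = 'a'
    · subst hca
      rcases t with _ | ⟨d, u⟩
      · decide
      · by_cases hdy : d = 'y'
        · subst hdy
          rcases u with _ | ⟨e, v⟩
          · decide
          · by_cases hea : e = 'a'
            · subst hea
              -- cs = aya ++ v
              have hpipe : pvPipe ('a'::'y'::'a'::v) = ' ' :: pvPipe v := by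
                simp only [pvPipe]
                rw [pvStepA, pvPassY (show (' ':Char) ≠ 'y' by decide),
                  pvPassW (show (' ':Char) ≠ 'w' by decide),
                  pvPassM (show (' ':Char) ≠ 'm' by decide)]
              rw [hpipe]
              simp only [List.all_cons, show PySem.Chars.isspace ' ' = true from rfl, Bool.true_and]
              rw [ih v (by simp only [List.length_cons] at hlen; omega)] <;> rfl
            · -- cs = a y e? … : pipeline keeps the leading 'a'
              have hpf : (['a','y','a'] : List Char).isPrefixOf ('a'::'y'::e::v) = false := by
                rw [pvPeel, pvPeel]
                exact pvPfxHead _ _ _ (by simpa using fun he => hea he)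
              simp only [pvPipe]
              rw [pvReplaceConsNeg _ _ _ _ hpf, pvPassY (show ('a':Char) ≠ 'y' by decide),
                pvPassW (show ('a':Char) ≠ 'w' by decide), pvPassM (show ('a':Char) ≠ 'm' by decide),
                pvAllConsFalse _ _ (by decide)]
              rw [pvBA hea] <;> rfl
        · -- cs = a d … with d ≠ 'y'
          have hpf : (['a','y','a'] : List Char).isPrefixOf ('a'::d::u) = false := by
            rw [pvPeel]
            exact pvPfxHead _ _ _ (by simpa using fun he => hdy he)
          simp only [pvPipe]
          rw [pvReplaceConsNeg _ _ _ _ hpf, pvPassY (show ('a':Char) ≠ 'y' by decide),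
            pvPassW (show ('a':Char) ≠ 'w' by decide), pvPassM (show ('a':Char) ≠ 'm' by decide),
            pvAllConsFalse _ _ (by decide)]
          rw [pvBA2 hdy] <;> rfl
    · by_cases hcy : c = 'y'
      · subst hcy
        rcases t with _ | ⟨d, u⟩
        · decide
        · by_cases hde : d = 'e'
          · subst hde
            -- cs = ye ++ u
            have hpipe : pvPipe ('y'::'e'::u) = ' ' :: pvPipe u := by
              simp only [pvPipe]
              rw [pvPassA (show ('y':Char) ≠ 'a' by decide), pvPassA (show ('e':Char) ≠ 'a' by decide),
                pvStepY, pvPassW (show (' ':Char) ≠ 'w' by decide),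
                pvPassM (show (' ':Char) ≠ 'm' by decide)]
            rw [hpipe]
            simp only [List.all_cons, show PySem.Chars.isspace ' ' = true from rfl, Bool.true_and]
            rw [ih u (by simp only [List.length_cons] at hlen; omega)] <;> rfl
          · -- 'ye' cannot match after blanking: head of repA (d::u) is ' ' or d, never 'e'
            have hz : (PySem.Chars.replace (d::u) ['a','y','a'] [' ']).head? ≠ some 'e' := by
              intro h
              exact hde (by simpa using pvHeadRep _ (by simp) _ _ (by decide) h)
            simp only [pvPipe]
            rw [pvPassA (show ('y':Char) ≠ 'a' by decide),
              pvReplaceConsNeg _ _ _ _ (by rw [pvPeel]; exact pvPfxHead _ _ _ hz),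
              pvPassW (show ('y':Char) ≠ 'w' by decide), pvPassM (show ('y':Char) ≠ 'm' by decide),
              pvAllConsFalse _ _ (by decide)]
            rw [pvBY hde] <;> rfl
      · by_cases hcw : c = 'w'
        · subst hcw
          rcases t with _ | ⟨d, u⟩
          · decide
          · by_cases hdo : d = 'o'
            · subst hdo
              rcases u with _ | ⟨e, v⟩
              · decide
              · by_cases heo : e = 'o'
                · subst heo
                  -- cs = woo ++ v
                  have hpipe : pvPipe ('w'::'o'::'o'::v) = ' ' :: pvPipe v := by
                    simp only [pvPipe]
                    rw [pvPassA (show ('w':Char) ≠ 'a' by decide), pvPassA (show ('o':Char) ≠ 'a' by decide),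
                      pvPassA (show ('o':Char) ≠ 'a' by decide),
                      pvPassY (show ('w':Char) ≠ 'y' by decide), pvPassY (show ('o':Char) ≠ 'y' by decide),
                      pvPassY (show ('o':Char) ≠ 'y' by decide),
                      pvStepW, pvPassM (show (' ':Char) ≠ 'm' by decide)]
                  rw [hpipe]
                  simp only [List.all_cons, show PySem.Chars.isspace ' ' = true from rfl, Bool.true_and]
                  rw [ih v (by simp only [List.length_cons] at hlen; omega)] <;> rfl
                · -- cs = w o e… with e ≠ 'o'
                  have hz : (PySem.Chars.replace (PySem.Chars.replace (e::v) ['a','y','a'] [' '])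
                      ['y','e'] [' ']).head? ≠ some 'o' := by
                    intro h
                    have h1 := pvHeadRep _ (by simp) _ _ (by decide) h
                    have h2 := pvHeadRep _ (by simp) _ _ (by decide) h1
                    exact heo (by simpa using h2)
                  simp only [pvPipe]
                  rw [pvPassA (show ('w':Char) ≠ 'a' by decide), pvPassA (show ('o':Char) ≠ 'a' by decide),
                    pvPassY (show ('w':Char) ≠ 'y' by decide), pvPassY (show ('o':Char) ≠ 'y' by decide),
                    pvReplaceConsNeg _ _ _ _ (by rw [pvPeel, pvPeel]; exact pvPfxHead _ _ _ hz),
                    pvPassM (show ('w':Char) ≠ 'm' by decide),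
                    pvAllConsFalse _ _ (by decide)]
                  rw [pvBW heo] <;> rfl
            · -- cs = w d … with d ≠ 'o'
              have hz : (PySem.Chars.replace (PySem.Chars.replace (d::u) ['a','y','a'] [' '])
                  ['y','e'] [' ']).head? ≠ some 'o' := by
                intro h
                have h1 := pvHeadRep _ (by simp) _ _ (by decide) h
                have h2 := pvHeadRep _ (by simp) _ _ (by decide) h1
                exact hdo (by simpa using h2)
              simp only [pvPipe]
              rw [pvPassA (show ('w':Char) ≠ 'a' by decide),
                pvPassY (show ('w':Char) ≠ 'y' by decide),
                pvReplaceConsNeg _ _ _ _ (by rw [pvPeel]; exact pvPfxHead _ _ _ hz),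
                pvPassM (show ('w':Char) ≠ 'm' by decide),
                pvAllConsFalse _ _ (by decide)]
              rw [pvBW2 hdo] <;> rfl
        · by_cases hcm : c = 'm'
          · subst hcm
            rcases t with _ | ⟨d, u⟩
            · decide
            · by_cases hda : d = 'a'
              · subst hda
                -- cs = m a u ; does u start with "ya"? (then the inner aya is blanked first)
                by_cases hya : (['y','a'] : List Char).isPrefixOf u = true
                · obtain ⟨v, hv⟩ := List.isPrefixOf_iff_prefix.mp hya
                  -- cs = m a y a v : repA blanks the inner aya, leaving the leading m unmatched
                  subst hv
                  simp only [List.cons_append, List.nil_append]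
                  simp only [pvPipe]
                  rw [pvPassA (show ('m':Char) ≠ 'a' by decide), pvStepA,
                    pvPassY (show ('m':Char) ≠ 'y' by decide), pvPassY (show (' ':Char) ≠ 'y' by decide),
                    pvPassW (show ('m':Char) ≠ 'w' by decide), pvPassW (show (' ':Char) ≠ 'w' by decide),
                    pvReplaceConsNeg _ _ _ _ (by rw [pvPeel]; exact pvPfxHead _ _ _ (by simp)),
                    pvAllConsFalse _ _ (by decide)]
                  exact (pvBY (show ('a' : Char) ≠ 'e' by decide)).symm
                · -- "ma" stays intact through repA/repY/repW and is blanked by repM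
                  have hpfA : (['a','y','a'] : List Char).isPrefixOf ('a'::u) = false := by
                    rw [pvPeel]; exact eq_false_of_ne_true hya
                  have hpipe : pvPipe ('m'::'a'::u) = ' ' :: pvPipe u := by
                    simp only [pvPipe]
                    rw [pvPassA (show ('m':Char) ≠ 'a' by decide), pvReplaceConsNeg _ _ _ _ hpfA,
                      pvPassY (show ('m':Char) ≠ 'y' by decide), pvPassY (show ('a':Char) ≠ 'y' by decide),
                      pvPassW (show ('m':Char) ≠ 'w' by decide), pvPassW (show ('a':Char) ≠ 'w' by decide),
                      pvStepM]
                  rw [hpipe]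
                  simp only [List.all_cons, show PySem.Chars.isspace ' ' = true from rfl, Bool.true_and]
                  rw [ih u (by simp only [List.length_cons] at hlen; omega)] <;> rfl
              · -- cs = m d … with d ≠ 'a'
                have hz : (PySem.Chars.replace (PySem.Chars.replace (PySem.Chars.replace (d::u)
                    ['a','y','a'] [' ']) ['y','e'] [' ']) ['w','o','o'] [' ']).head? ≠ some 'a' := by
                  intro h
                  have h1 := pvHeadRep _ (by simp) _ _ (by decide) h
                  have h2 := pvHeadRep _ (by simp) _ _ (by decide) h1
                  have h3 := pvHeadRep _ (by simp) _ _ (by decide) h2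
                  exact hda (by simpa using h3)
                simp only [pvPipe]
                rw [pvPassA (show ('m':Char) ≠ 'a' by decide),
                  pvPassY (show ('m':Char) ≠ 'y' by decide),
                  pvPassW (show ('m':Char) ≠ 'w' by decide),
                  pvReplaceConsNeg _ _ _ _ (by rw [pvPeel]; exact pvPfxHead _ _ _ hz),
                  pvAllConsFalse _ _ (by decide)]
                rw [pvBM hda] <;> rfl
          · -- default: c passes through all four replaces untouched
            have hpipe : pvPipe (c::t) = c :: pvPipe t := by
              simp only [pvPipe]
              rw [pvPassA hca, pvPassY hcy, pvPassW hcw, pvPassM hcm]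
            rw [hpipe]
            simp only [List.all_cons]
            rw [ih t (by omega)]
            rw [pvB0 hca hcy hcw hcm] <;> rfl

-- ---- strip characterisation ----

theorem pvStripNilIff (cs : List Char) :
    (PySem.Chars.strip cs = []) ↔ cs.all PySem.Chars.isspace = true := by
  unfold PySem.Chars.strip PySem.Chars.rstrip PySem.Chars.lstrip
  simp only [List.reverse_eq_nil_iff, List.dropWhile_eq_nil_iff, List.mem_reverse, List.all_eq_true]
  constructor
  · intro h x hx
    by_cases hm : x ∈ List.dropWhile PySem.Chars.isspace cs
    · exact h x hm
    · have hx2 : x ∈ List.takeWhile PySem.Chars.isspace cs ++ List.dropWhile PySem.Chars.isspace cs := by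
        rw [List.takeWhile_append_dropWhile]; exact hx
      rcases List.mem_append.mp hx2 with h1 | h2
      · exact List.mem_takeWhile_imp h1
      · exact absurd h2 hm
  · intro h x hx
    exact h x ((List.dropWhile_sublist _).subset hx)

-- ---- A's per-string test equals the token-and-whitespace tiling predicate ----

theorem pvATest (s : String) :
    (PySem.Str.strip (PySem.Str.replace (PySem.Str.replace (PySem.Str.replace (PySem.Str.replace s
        "aya" " ") "ye" " ") "woo" " ") "ma" " ") == "") = solAltScan s.toList := by
  rw [Bool.eq_iff_iff, beq_iff_eq, ← String.toList_inj]
  simp only [PySem.Str.toList_strip, PySem.Str.toList_replace]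
  rw [show ("aya" : String).toList = ['a','y','a'] from rfl,
    show ("ye" : String).toList = ['y','e'] from rfl,
    show ("woo" : String).toList = ['w','o','o'] from rfl,
    show ("ma" : String).toList = ['m','a'] from rfl,
    show (" " : String).toList = [' '] from rfl,
    show ("" : String).toList = ([] : List Char) from rfl]
  rw [show PySem.Chars.replace (PySem.Chars.replace (PySem.Chars.replace (PySem.Chars.replace s.toList
    ['a','y','a'] [' ']) ['y','e'] [' ']) ['w','o','o'] [' ']) ['m','a'] [' '] = pvPipe s.toList from rfl]
  rw [pvStripNilIff, pvMainAux s.toList.length s.toList le_rfl]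

-- ---- counting loops as countP ----

theorem pvFoldCount (p : String → Bool) : ∀ (l : List String) (a : Int),
    List.foldl (fun acc s => if p s then acc + 1 else acc) a l = a + ((l.countP p : Nat) : Int) := by
  intro l
  induction l with
  | nil => intro a; simp
  | cons x xs ih =>
    intro a
    rw [List.foldl_cons, List.countP_cons]
    by_cases h : p x = true
    · rw [if_pos h, ih, if_pos h]; push_cast; ring
    · rw [if_neg h, ih, if_neg h]; push_cast; ring

theorem pvSolutionEq (babbling : List String) :
    solution babbling = ((babbling.countP (fun s => solAltScan s.toList) : Nat) : Int) := by
  have h := pvFoldCount (fun i => (PySem.Str.strip ((["aya","ye","woo","ma"] : List String).foldl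
    (fun word p => PySem.Str.replace word p " ") i) == "")) babbling 0
  have h2 : babbling.countP (fun i => (PySem.Str.strip ((["aya","ye","woo","ma"] : List String).foldl
      (fun word p => PySem.Str.replace word p " ") i) == ""))
      = babbling.countP (fun s => solAltScan s.toList) := by
    apply List.countP_congr
    intro s _hs
    rw [show (List.foldl (fun word p => PySem.Str.replace word p " ") s ["aya","ye","woo","ma"])
      = (PySem.Str.replace (PySem.Str.replace (PySem.Str.replace (PySem.Str.replace s "aya" " ")
        "ye" " ") "woo" " ") "ma" " ") from rfl, pvATest s]
  exact h.trans (by rw [h2]; omega)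

theorem pvSolutionAltEq (babbling : List String) :
    solution_alt babbling = ((babbling.countP (fun s => solAltScan s.toList) : Nat) : Int) := by
  have h := pvFoldCount (fun s => solAltScan s.toList) babbling 0
  exact h.trans (by omega)

-- ===== VERDICT (by name: the statement is the Claim_ definition above) =====
theorem solution_spec : Claim_equal_solution := by
  intro babbling _hdom
  show solution babbling = solution_alt babbling
  rw [pvSolutionEq, pvSolutionAltEq]
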